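-- pv_equiv track=rewrite | github.com/ccc6501/F22-command | blueprint_clickable_mapper.py | _zone_to_int
-- ===== SOURCE A (Python) =====
-- def _zone_to_int(zone_id):
--     if zone_id is None:
--         return None
--     s = str(zone_id)
--     digits = ''.join(ch for ch in s if ch.isdigit())
--     if not digits:
--         return None
--     try:
--         return int(digits)
--     except Exception:
--         return None
-- ===== SOURCE B (Python) =====
-- def _zone_to_int(zone_id):
--     if zone_id is None:
--         return None
--     acc = None
--     for ch in str(zone_id):
--         if '0' <= ch <= '9':
--             acc = (0 if acc is None else acc) * 10 + (ord(ch) - 48)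
--     return acc
-- ===== Notes on version B (the rewrite author's own statement) =====
-- stated objective: alternative
-- what changed: B never builds a digit string or calls int(): it folds the digits directly into an integer Horner accumulator (acc = acc*10 + digit) in one pass, with None as the accumulator state before the first digit.
import Mathlib
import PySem

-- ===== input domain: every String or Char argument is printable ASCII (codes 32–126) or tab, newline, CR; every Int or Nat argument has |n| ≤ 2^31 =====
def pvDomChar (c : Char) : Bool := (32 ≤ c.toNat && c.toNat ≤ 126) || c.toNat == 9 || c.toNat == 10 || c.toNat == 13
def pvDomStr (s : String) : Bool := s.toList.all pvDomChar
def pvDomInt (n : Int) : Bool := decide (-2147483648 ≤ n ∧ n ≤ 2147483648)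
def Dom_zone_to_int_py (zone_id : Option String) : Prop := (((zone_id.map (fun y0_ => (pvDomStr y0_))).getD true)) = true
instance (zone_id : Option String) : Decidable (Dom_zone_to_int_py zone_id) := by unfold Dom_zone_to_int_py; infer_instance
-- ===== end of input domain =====

-- B replaces A's filter-digits-then-int() pipeline by a single pass that folds each digit
-- directly into an integer Horner accumulator (alternative decomposition, same cost).

-- ===== PORT A =====
-- 'digits = ''.join(ch for ch in s if ch.isdigit())' → filter over the characters.
-- 'int(digits)' inside try/except is ported by hand as pyIntOfDigits?: A only ever calls it on a
-- string of characters accepted by isdigit, and on the ASCII domain these are exactly '0'..'9',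
-- where int() returns the decimal value (the fold below) and never raises; a non-digit or empty
-- argument yields none, mirroring ValueError, which the except arm turns into None.
def pyIntOfDigits? (ds : List Char) : Option Int :=
  if ds = [] ∨ ¬ (ds.all (fun c => '0' ≤ c && c ≤ '9')) then none
  else some (ds.foldl (fun a c => a * 10 + ((c.toNat : Int) - 48)) 0)

def zone_to_int_py (zone_id : Option String) : Option Int :=
  match zone_id with
  | none => none
  | some s =>
    let digits : List Char := s.toList.filter (fun ch => PySem.Chars.isdigit ch)
    if digits = [] then none
    else
      match pyIntOfDigits? digits with
      | some n => some n
      | none => none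

-- ===== PORT B =====
-- 'acc = None; for ch in str(zone_id): if '0' <= ch <= '9': acc = (0 if acc is None else acc)*10
-- + (ord(ch) - 48); return acc' → one foldl over the characters with an Option Int accumulator.
def zone_to_int_py_alt (zone_id : Option String) : Option Int :=
  match zone_id with
  | none => none
  | some s =>
    s.toList.foldl
      (fun acc ch =>
        if '0' ≤ ch ∧ ch ≤ '9' then some ((acc.getD 0) * 10 + ((ch.toNat : Int) - 48)) else acc)
      none

-- ===== PRECONDITION & SPEC =====
def Spec_zone_to_int_py (zone_id : Option String) (out : Option Int) : Prop := out = zone_to_int_py_alt zone_id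
instance (zone_id : Option String) (out : Option Int) : Decidable (Spec_zone_to_int_py zone_id out) := by unfold Spec_zone_to_int_py; infer_instance

-- ===== CLAIM (what is proved, stated in full; the proofs are below) =====
def Claim_equal_zone_to_int_py : Prop := ∀ (zone_id : Option String), Dom_zone_to_int_py zone_id → Spec_zone_to_int_py zone_id (zone_to_int_py zone_id)

-- ===== LEMMAS AND PROOFS =====

-- Once B's accumulator holds a value, it just keeps Horner-folding the remaining digits.
theorem bfold_some (l : List Char) (a : Int) :
    l.foldl
      (fun acc ch =>
        if '0' ≤ ch ∧ ch ≤ '9' then some ((acc.getD 0) * 10 + ((ch.toNat : Int) - 48)) else acc)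
      (some a)
      = some ((l.filter (fun ch => PySem.Chars.isdigit ch)).foldl
          (fun a c => a * 10 + ((c.toNat : Int) - 48)) a) := by
  induction l generalizing a with
  | nil => rfl
  | cons c t ih =>
    simp only [List.foldl_cons, List.filter_cons]
    by_cases h : '0' ≤ c ∧ c ≤ '9'
    · have hd : PySem.Chars.isdigit c = true := by simp [PySem.Chars.isdigit, h.1, h.2]
      simpa [h, hd] using ih (a * 10 + ((c.toNat : Int) - 48))
    · have hd : PySem.Chars.isdigit c = false := by
        simp only [PySem.Chars.isdigit, Bool.and_eq_false_iff, decide_eq_false_iff_not]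
        by_cases h1 : '0' ≤ c
        · exact Or.inr (fun h2 => h ⟨h1, h2⟩)
        · exact Or.inl h1
      simp [h, hd, ih]

-- From the empty accumulator, B returns none when no character is a digit, and otherwise the
-- Horner value of the filtered digits from 0.
theorem bfold_none (l : List Char) :
    l.foldl
      (fun acc ch =>
        if '0' ≤ ch ∧ ch ≤ '9' then some ((acc.getD 0) * 10 + ((ch.toNat : Int) - 48)) else acc)
      none
      = (if l.filter (fun ch => PySem.Chars.isdigit ch) = [] then none
         else some ((l.filter (fun ch => PySem.Chars.isdigit ch)).foldl
             (fun a c => a * 10 + ((c.toNat : Int) - 48)) 0)) := by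
  induction l with
  | nil => rfl
  | cons c t ih =>
    simp only [List.foldl_cons, List.filter_cons]
    by_cases h : '0' ≤ c ∧ c ≤ '9'
    · have hd : PySem.Chars.isdigit c = true := by simp [PySem.Chars.isdigit, h.1, h.2]
      simpa [h, hd] using bfold_some t ((0:Int) * 10 + ((c.toNat : Int) - 48))
    · have hd : PySem.Chars.isdigit c = false := by
        simp only [PySem.Chars.isdigit, Bool.and_eq_false_iff, decide_eq_false_iff_not]
        by_cases h1 : '0' ≤ c
        · exact Or.inr (fun h2 => h ⟨h1, h2⟩)
        · exact Or.inl h1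
      simp [h, hd, ih]

-- Every character A's filter keeps is in '0'..'9', so the hand-ported int() succeeds.
theorem pyIntOfDigits?_filter (l : List Char)
    (hne : l.filter (fun ch => PySem.Chars.isdigit ch) ≠ []) :
    pyIntOfDigits? (l.filter (fun ch => PySem.Chars.isdigit ch))
      = some ((l.filter (fun ch => PySem.Chars.isdigit ch)).foldl
          (fun a c => a * 10 + ((c.toNat : Int) - 48)) 0) := by
  have hall : (l.filter (fun ch => PySem.Chars.isdigit ch)).all (fun c => '0' ≤ c && c ≤ '9') = true := by
    simp only [List.all_eq_true]
    intro c hc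
    have := List.of_mem_filter hc
    simpa [PySem.Chars.isdigit] using this
  simp [pyIntOfDigits?, hne, hall]

-- ===== VERDICT (by name: the statement is the Claim_ definition above) =====
theorem zone_to_int_py_spec : Claim_equal_zone_to_int_py := by
  intro zone_id _
  unfold Spec_zone_to_int_py zone_to_int_py zone_to_int_py_alt
  cases zone_id with
  | none => rfl
  | some s =>
    simp only [bfold_none]
    by_cases h : s.toList.filter (fun ch => PySem.Chars.isdigit ch) = []
    · simp [h]
    · simp [h, pyIntOfDigits?_filter s.toList h]
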